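-- pv_equiv track=rewrite | github.com/kajikaji0725/tume_demo_GUI | tume/utils.py | num2ascii
-- ===== SOURCE A (Python) =====
-- def num2ascii(num_list):
--     newlist = ""
--     for i in num_list:
--         bin_num = bin(i)
--         bin_num = bin_num[2:]
--         zero_num = bin_num.zfill(5)
--         newlist = newlist + str(zero_num)
--
--     v = [newlist[i : i + 7] for i in range(0, len(newlist), 7)]
--     acode_list = ""
--
--     for i in range(len(v)):
--         num5 = int(str(v[i]), 2)
--         asc = chr(num5)
--         acode_list = acode_list + asc
--
--     return acode_list
-- ===== SOURCE B (Python) =====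
-- def num2ascii(num_list):
--     out = []
--     acc = 0
--     cnt = 0
--     for n in num_list:
--         m = n
--         bits = []
--         if m == 0:
--             bits = [0]
--         else:
--             while m > 0:
--                 bits.append(m % 2)
--                 m //= 2
--             bits.reverse()
--         bits = [0] * (5 - len(bits)) + bits
--         for b in bits:
--             acc = 2 * acc + b
--             cnt += 1
--             if cnt == 7:
--                 out.append(chr(acc))
--                 acc = 0
--                 cnt = 0
--     if cnt:
--         out.append(chr(acc))
--     return "".join(out)
-- ===== Notes on version B (the rewrite author's own statement) =====
-- stated objective: faster
-- what changed: Instead of concatenating all 5-bit strings into one big string, slicing it into a list of 7-char chunks and re-parsing each chunk with int(...,2), B makes a single streaming pass that computes the bits of each number arithmetically and folds them into an integer accumulator with a bit counter, emitting chr(acc) every 7 bits and once more for a nonzero leftover.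
-- outside the precondition, e.g. on num2ascii([0, -1]): A returns '\x00\x01', B returns '\x00\x00'; on num2ascii([-1]): A raises ValueError, B returns '\x00'
import Mathlib
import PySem

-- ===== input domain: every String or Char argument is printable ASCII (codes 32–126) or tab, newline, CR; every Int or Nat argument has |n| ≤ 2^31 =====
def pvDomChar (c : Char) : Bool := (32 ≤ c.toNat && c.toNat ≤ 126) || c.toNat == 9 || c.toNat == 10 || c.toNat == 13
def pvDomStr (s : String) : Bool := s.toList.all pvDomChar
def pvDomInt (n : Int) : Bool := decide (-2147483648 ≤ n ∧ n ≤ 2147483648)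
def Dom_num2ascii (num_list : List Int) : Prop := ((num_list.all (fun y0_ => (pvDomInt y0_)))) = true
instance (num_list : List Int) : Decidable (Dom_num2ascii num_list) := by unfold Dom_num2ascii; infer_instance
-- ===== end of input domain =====

-- B replaces A's quadratic build-one-big-string-then-slice-into-7-chunks pipeline by a single
-- streaming pass with an integer accumulator and bit counter (measured faster; return value only).

-- ===== PORT A =====
-- int(s, 2) hand-ported: exact for the nonempty '0'/'1' strings that are the only chunks
-- reachable under Pre_num2ascii (on other inputs Python's int(...,2) raises ValueError).
def pvParseBin2 (cs : List Char) : Nat :=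
  cs.foldl (fun a c => 2 * a + (if c = '1' then 1 else 0)) 0

def num2ascii (num_list : List Int) : String :=
  -- newlist += bin(i)[2:].zfill(5)  (strings kept as List Char, PySem.Chars level)
  let newlist : List Char :=
    num_list.foldl
      (fun nl i =>
        nl ++ PySem.Chars.zfill (PySem.List.slice (PySem.Int.toBinChars0b i) (some 2) none) 5) []
  -- v = [newlist[i:i+7] for i in range(0, len(newlist), 7)]
  let v : List (List Char) :=
    (PySem.List.pyRange 0 (PySem.List.len newlist) 7).map
      (fun i => PySem.List.slice newlist (some i) (some (i + 7)))
  -- for i in range(len(v)): acode_list += chr(int(v[i], 2))   (v[i] visits v in order;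
  -- chr ported as Char.ofNat, exact here since every chunk value is < 2^7)
  let acode : List Char := v.foldl (fun ac chunk => ac ++ [Char.ofNat (pvParseBin2 chunk)]) []
  String.ofList acode

-- ===== PORT B =====
-- while m > 0: bits.append(m % 2); m //= 2   — LSB-first digit list
def pvBitsRevB (m : Nat) : List Nat :=
  if m = 0 then [] else m % 2 :: pvBitsRevB (m / 2)
decreasing_by exact Nat.div_lt_self (Nat.pos_of_ne_zero (by assumption)) (by norm_num)

-- the body of B's inner loop: acc = 2*acc + b; cnt += 1; emit chr(acc) on cnt == 7
def pvStepB (st : List Char × Nat × Nat) (b : Nat) : List Char × Nat × Nat :=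
  let acc := 2 * st.2.1 + b
  let cnt := st.2.2 + 1
  if cnt = 7 then (st.1 ++ [Char.ofNat acc], 0, 0) else (st.1, acc, cnt)

def num2ascii_alt (num_list : List Int) : String :=
  let st :=
    num_list.foldl
      (fun st n =>
        -- bits = [0] if m == 0 else reversed digit list; then [0]*(5-len(bits)) + bits
        -- (for m < 0 Python's while loop yields [], padded to five 0s; n.toNat = 0 gives
        -- [0] padded to the same five 0s — equal values, and outside Pre_ anyway)
        let bits0 := if n.toNat = 0 then [0] else (pvBitsRevB n.toNat).reverse
        let bits := List.replicate (5 - bits0.length) 0 ++ bits0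
        bits.foldl pvStepB st)
      ([], 0, 0)
  String.ofList (if st.2.2 ≠ 0 then st.1 ++ [Char.ofNat st.2.1] else st.1)

-- ===== PRECONDITION & SPEC =====
-- Pre_ excludes lists containing a negative number: there bin(i)[2:] keeps a 'b' in the bit
-- string, so A normally raises ValueError at int(..., 2), and when the 'b' happens to align as
-- an accepted '0b' prefix of a chunk A returns an accidental value no one would specify.
def Pre_num2ascii (num_list : List Int) : Prop := ∀ i ∈ num_list, 0 ≤ i
instance (num_list : List Int) : Decidable (Pre_num2ascii num_list) := by
  unfold Pre_num2ascii; infer_instance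

def pvWitness_num2ascii : List Int := [0, 5, 31, 32, 1000]

def Spec_num2ascii (num_list : List Int) (out : String) : Prop := out = num2ascii_alt num_list
instance (num_list : List Int) (out : String) : Decidable (Spec_num2ascii num_list out) := by
  unfold Spec_num2ascii; infer_instance

-- ===== CLAIM (what is proved, stated in full; the proofs are below) =====
def Claim_equal_num2ascii : Prop := ∀ (num_list : List Int), Dom_num2ascii num_list → Pre_num2ascii num_list → Spec_num2ascii num_list (num2ascii num_list)

-- ===== LEMMAS AND PROOFS =====

-- MSB-first bit list of n (bin(n) without prefix; [0] for n = 0)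
def pvBitsM (n : Nat) : List Nat := if n = 0 then [0] else (pvBitsRevB n).reverse

-- the 5-left-padded encoding of one number
def pvEnc (n : Nat) : List Nat := List.replicate (5 - (pvBitsM n).length) 0 ++ pvBitsM n

def pvBitChar (b : Nat) : Char := if b = 1 then '1' else '0'

def pvVal (bl : List Nat) : Nat := bl.foldl (fun a b => 2 * a + b) 0

def pvChunks {α : Type} (l : List α) : List (List α) :=
  if l = [] then [] else l.take 7 :: pvChunks (l.drop 7)
termination_by l.length
decreasing_by
  rename_i h
  have : 0 < l.length := List.length_pos_iff.mpr h
  simp [List.length_drop]; omega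

def pvFinish (st : List Char × Nat × Nat) : List Char :=
  if st.2.2 ≠ 0 then st.1 ++ [Char.ofNat st.2.1] else st.1

lemma pvBitsM_ne_nil (n : Nat) : pvBitsM n ≠ [] := by
  unfold pvBitsM
  split
  · simp
  · rename_i h
    rw [pvBitsRevB.eq_def]
    simp [h]

lemma bitsM_bits (n : Nat) : ∀ b ∈ pvBitsM n, b = 0 ∨ b = 1 := by
  have hrev : ∀ m, ∀ b ∈ pvBitsRevB m, b = 0 ∨ b = 1 := by
    intro m
    induction m using Nat.strong_induction_on with
    | _ m ih =>
      intro b hb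
      rw [pvBitsRevB.eq_def] at hb
      split at hb
      · simp at hb
      · rename_i hm
        rcases List.mem_cons.mp hb with h | h
        · omega
        · exact ih (m / 2) (Nat.div_lt_self (Nat.pos_of_ne_zero hm) (by norm_num)) b h
  intro b hb
  unfold pvBitsM at hb
  split at hb
  · simp at hb; omega
  · exact hrev _ b (List.mem_reverse.mp hb)

lemma enc_bits (n : Nat) : ∀ b ∈ pvEnc n, b = 0 ∨ b = 1 := by
  intro b hb
  unfold pvEnc at hb
  rcases List.mem_append.mp hb with h | h
  · left; exact List.eq_of_mem_replicate h
  · exact bitsM_bits n b h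

lemma toDigits_two_eq (n : Nat) : Nat.toDigits 2 n = (pvBitsM n).map pvBitChar := by
  induction n using Nat.strong_induction_on with
  | _ n ih =>
    by_cases h0 : n = 0
    · subst h0; simp [Nat.toDigits_zero, pvBitsM, pvBitChar]
    by_cases h1 : n = 1
    · subst h1
      rw [Nat.toDigits_of_lt_base (by norm_num)]
      rw [pvBitsM]
      simp only [if_neg (by norm_num : (1:Nat) ≠ 0)]
      rw [pvBitsRevB.eq_def]
      norm_num
      rw [pvBitsRevB.eq_def]
      simp [pvBitChar]
      rfl
    · have h2 : 2 ≤ n := by omega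
      rw [Nat.toDigits_eq_if (by norm_num)]
      rw [if_neg (by omega)]
      have hd : n / 2 < n := Nat.div_lt_self (by omega) (by norm_num)
      have hdz : n / 2 ≠ 0 := by omega
      rw [ih (n / 2) hd]
      have hsp : pvBitsM n = pvBitsM (n / 2) ++ [n % 2] := by
        unfold pvBitsM
        rw [if_neg h0, if_neg hdz]
        rw [pvBitsRevB.eq_def, if_neg h0]
        simp
      rw [hsp, List.map_append]
      congr 1
      have : n % 2 = 0 ∨ n % 2 = 1 := by omega
      rcases this with h | h <;> simp [h, pvBitChar, Nat.digitChar]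

-- zfill of a rendered nonempty bit string is a plain left pad
lemma zfill_pad (bl : List Nat) (hne : bl ≠ []) (h01 : ∀ b ∈ bl, b = 0 ∨ b = 1) :
    PySem.Chars.zfill (bl.map pvBitChar) 5
      = (List.replicate (5 - bl.length) 0 ++ bl).map pvBitChar := by
  rcases bl with _ | ⟨c, rest⟩
  · exact absurd rfl hne
  have hc01 : pvBitChar c = '0' ∨ pvBitChar c = '1' := by
    rcases h01 c (by simp) with h | h <;> simp [pvBitChar, h]
  unfold PySem.Chars.zfill
  by_cases hlen : (5 : Int) ≤ ((List.map pvBitChar (c :: rest)).length : Int)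
  · rw [if_pos hlen]
    have hz : 5 - (c :: rest).length = 0 := by
      simp only [List.length_map, List.length_cons] at hlen
      simp only [List.length_cons]
      omega
    rw [hz]
    simp
  · rw [if_neg hlen]
    simp only [List.map_cons]
    have hnp : ¬ (pvBitChar c = '+' ∨ pvBitChar c = '-') := by
      rcases hc01 with h | h <;> simp [h]
    rw [if_neg hnp]
    rw [List.map_append]
    have : (List.replicate (5 - (c :: rest).length) 0).map pvBitChar
        = List.replicate (5 - (c :: rest).length) '0' := by
      simp [pvBitChar]
    rw [this]
    simp [List.length_map, List.length_cons]

-- A's per-number string equals the encoding, rendered as characters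
lemma perNum_eq (i : Int) (hi : 0 ≤ i) :
    PySem.Chars.zfill (PySem.List.slice (PySem.Int.toBinChars0b i) (some 2) none) 5
      = (pvEnc i.toNat).map pvBitChar := by
  have h1 : PySem.Int.toBinChars0b i = '0' :: 'b' :: Nat.toDigits 2 i.toNat := by
    unfold PySem.Int.toBinChars0b
    rw [if_neg (by omega)]
  rw [h1]
  have h2 : PySem.List.slice ('0' :: 'b' :: Nat.toDigits 2 i.toNat) (some 2) none
      = Nat.toDigits 2 i.toNat := by
    have := PySem.List.slice_from_natCast ('0' :: 'b' :: Nat.toDigits 2 i.toNat) 2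
    simpa using this
  rw [h2, toDigits_two_eq]
  rw [zfill_pad _ (pvBitsM_ne_nil i.toNat) (bitsM_bits i.toNat)]
  rfl

-- foldl-append over a list is flatMap
lemma foldl_append_flat {α β : Type} (f : α → List β) (l : List α) (init : List β) :
    l.foldl (fun nl i => nl ++ f i) init = init ++ l.flatMap f := by
  induction l generalizing init with
  | nil => simp
  | cons x xs ih => simp [List.foldl_cons, ih, List.flatMap_cons]

-- the slice comprehension computes pvChunks
lemma pyRange7_cons (n : Int) (hn : 0 < n) :
    PySem.List.pyRange 0 n 7 = 0 :: (PySem.List.pyRange 0 (n - 7) 7).map (· + 7) := by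
  rw [PySem.List.pyRange_of_pos _ _ (by norm_num : (0:Int) < 7),
      PySem.List.pyRange_of_pos _ _ (by norm_num : (0:Int) < 7)]
  have hcount : ((n - 0 + 7 - 1) / 7).toNat
      = (if (0:Int) < n - 7 then ((n - 7 - 0 + 7 - 1) / 7).toNat else 0) + 1 := by
    split <;> omega
  rw [if_pos hn, hcount, List.range_succ_eq_map]
  simp only [List.map_cons, List.map_map]
  constructor

lemma slice_chunks (l : List Char) :
    (PySem.List.pyRange 0 (l.length : Int) 7).map
        (fun i => PySem.List.slice l (some i) (some (i + 7))) = pvChunks l := by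
  induction hk : l.length using Nat.strong_induction_on generalizing l with
  | _ k ih =>
    subst hk
    by_cases h0 : l = []
    · subst h0
      rw [pvChunks.eq_def]
      simp [PySem.List.pyRange]
    · have hlen : 0 < l.length := List.length_pos_iff.mpr h0
      rw [pvChunks.eq_def, if_neg h0]
      rw [pyRange7_cons _ (by exact_mod_cast hlen)]
      rw [List.map_cons, List.map_map]
      congr 1
      · have := PySem.List.slice_natCast l 0 7
        simpa using this
      · have hrec := ih (l.drop 7).length (by simp [List.length_drop]; omega) (l.drop 7) rfl
        have hrange : PySem.List.pyRange 0 ((l.length : Int) - 7) 7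
            = PySem.List.pyRange 0 ((l.drop 7).length : Int) 7 := by
          by_cases h7 : 7 ≤ l.length
          · congr 1
            simp [List.length_drop]
            omega
          · rw [PySem.List.pyRange_of_pos _ _ (by norm_num : (0:Int) < 7),
                PySem.List.pyRange_of_pos _ _ (by norm_num : (0:Int) < 7)]
            rw [if_neg (by omega), if_neg (by simp [List.length_drop]; omega)]
        rw [hrange, ← hrec]
        apply List.map_congr_left
        intro i hi
        have hi0 : 0 ≤ i := ((PySem.List.mem_pyRange_iff_of_pos (by norm_num) i).mp hi).1
        simp only [Function.comp]
        rw [PySem.List.slice_toNat _ (by omega) (by omega),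
            PySem.List.slice_toNat _ (by omega) (by omega)]
        rw [List.drop_drop]
        congr 1
        · omega
        · congr 1
          omega

-- foldl appending singletons is map
lemma foldl_append_singleton {α β : Type} (g : α → β) (v : List α) (init : List β) :
    v.foldl (fun ac c => ac ++ [g c]) init = init ++ v.map g := by
  induction v generalizing init with
  | nil => simp
  | cons x xs ih => simp [ih]

-- pvChunks commutes with map
lemma chunks_map {α β : Type} (f : α → β) (l : List α) :
    pvChunks (l.map f) = (pvChunks l).map (List.map f) := by
  induction hk : l.length using Nat.strong_induction_on generalizing l with
  | _ k ih =>
    subst hk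
    by_cases h0 : l = []
    · subst h0; rw [pvChunks.eq_def]; simp [pvChunks.eq_def]
    · conv_lhs => rw [pvChunks.eq_def]
      conv_rhs => rw [pvChunks.eq_def]
      rw [if_neg h0, if_neg (by simp [h0])]
      rw [List.map_cons, ← List.map_take, ← List.map_drop]
      have hlen : 0 < l.length := List.length_pos_iff.mpr h0
      congr 1
      exact ih (l.drop 7).length (by simp [List.length_drop]; omega) _ rfl

-- every element inside a chunk comes from the flat list
lemma chunks_mem {α : Type} (l : List α) : ∀ c ∈ pvChunks l, ∀ b ∈ c, b ∈ l := by
  induction hk : l.length using Nat.strong_induction_on generalizing l with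
  | _ k ih =>
    subst hk
    intro c hc b hb
    rw [pvChunks.eq_def] at hc
    split at hc
    · simp at hc
    · rename_i h0
      have hlen : 0 < l.length := List.length_pos_iff.mpr h0
      rcases List.mem_cons.mp hc with h | h
      · exact List.take_subset 7 l (h ▸ hb)
      · exact List.drop_subset 7 l
          (ih (l.drop 7).length (by simp [List.length_drop]; omega) _ rfl c h b hb)

-- parsing the rendered chunk gives its bit value
lemma parse_map_bitChar (bl : List Nat) (h : ∀ b ∈ bl, b = 0 ∨ b = 1) :
    pvParseBin2 (bl.map pvBitChar) = pvVal bl := by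
  unfold pvParseBin2 pvVal
  have : ∀ (a : Nat), (bl.map pvBitChar).foldl (fun a c => 2 * a + (if c = '1' then 1 else 0)) a
      = bl.foldl (fun a b => 2 * a + b) a := by
    induction bl with
    | nil => intro a; simp
    | cons x xs ih =>
      intro a
      simp only [List.map_cons, List.foldl_cons]
      rw [ih (fun b hb => h b (by simp [hb]))]
      rcases h x (by simp) with hx | hx <;> simp [hx, pvBitChar]
  exact this 0

lemma val_append_singleton (p : List Nat) (b : Nat) : pvVal (p ++ [b]) = 2 * pvVal p + b := by
  unfold pvVal
  rw [List.foldl_append]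
  rfl

-- the streaming pass equals chunk-and-encode
lemma stream_eq (bl : List Nat) : ∀ (p : List Nat) (out : List Char), p.length < 7 →
    pvFinish (bl.foldl pvStepB (out, pvVal p, p.length))
      = out ++ (pvChunks (p ++ bl)).map (fun c => Char.ofNat (pvVal c)) := by
  induction bl with
  | nil =>
    intro p out hp
    simp only [List.foldl_nil, List.append_nil]
    unfold pvFinish
    by_cases h0 : p = []
    · subst h0
      rw [pvChunks.eq_def]
      simp [pvVal]
    · have hne : p.length ≠ 0 := by simp [h0]
      rw [if_pos (by simpa using hne)]
      rw [pvChunks.eq_def, if_neg h0]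
      rw [List.take_of_length_le (by omega), List.drop_of_length_le (by omega)]
      rw [pvChunks.eq_def]
      simp
  | cons b rest ih =>
    intro p out hp
    rw [List.foldl_cons]
    have hstep : pvStepB (out, pvVal p, p.length) b
        = if p.length + 1 = 7 then (out ++ [Char.ofNat (pvVal (p ++ [b]))], 0, 0)
          else (out, pvVal (p ++ [b]), (p ++ [b]).length) := by
      unfold pvStepB
      rw [← val_append_singleton]
      simp
    rw [hstep]
    by_cases h7 : p.length + 1 = 7
    · rw [if_pos h7]
      rw [show ((out ++ [Char.ofNat (pvVal (p ++ [b]))], 0, 0) : List Char × Nat × Nat)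
          = (out ++ [Char.ofNat (pvVal (p ++ [b]))], pvVal [], ([] : List Nat).length) from rfl]
      rw [ih [] _ (by simp)]
      have hchunks : pvChunks (p ++ b :: rest) = (p ++ [b]) :: pvChunks rest := by
        have hassoc : p ++ b :: rest = (p ++ [b]) ++ rest := by simp
        rw [hassoc, pvChunks.eq_def, if_neg (by simp)]
        have hlen : (p ++ [b]).length = 7 := by simp; omega
        rw [← hlen, List.take_left, List.drop_left]
      rw [hchunks]
      simp
    · rw [if_neg h7]
      have hlb : (p ++ [b]).length < 7 := by simp; omega
      rw [ih (p ++ [b]) out hlb]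
      congr 2
      simp

-- fuse the two nested foldls of B into one foldl over the flat bit list
lemma foldl_foldl_flat {α : Type} (enc : α → List Nat) (l : List α)
    (init : List Char × Nat × Nat) :
    l.foldl (fun st n => (enc n).foldl pvStepB st) init
      = (l.flatMap enc).foldl pvStepB init := by
  induction l generalizing init with
  | nil => simp
  | cons x xs ih => simp [List.foldl_append, ih]

-- flatMap of the rendered encodings is the rendered flat bit list
lemma flat_eq (num_list : List Int) (hpre : ∀ i ∈ num_list, 0 ≤ i) :
    num_list.flatMap
        (fun i => PySem.Chars.zfill (PySem.List.slice (PySem.Int.toBinChars0b i) (some 2) none) 5)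
      = (num_list.flatMap (fun i => pvEnc i.toNat)).map pvBitChar := by
  induction num_list with
  | nil => simp
  | cons x xs ih =>
    simp only [List.flatMap_cons, List.map_append]
    rw [perNum_eq x (hpre x (by simp)), ih (fun i hi => hpre i (by simp [hi]))]

-- B computed via the fused flat foldl
lemma altB_eq (num_list : List Int) :
    num2ascii_alt num_list
      = String.ofList (pvFinish ((num_list.flatMap (fun i => pvEnc i.toNat)).foldl pvStepB
          ([], 0, 0))) := by
  unfold num2ascii_alt pvFinish
  rw [← foldl_foldl_flat (fun i => pvEnc i.toNat) num_list ([], 0, 0)]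
  rfl

-- A computed via pvChunks of the flat bit string
lemma a_eq (num_list : List Int) (hpre : ∀ i ∈ num_list, 0 ≤ i) :
    num2ascii num_list
      = String.ofList ((pvChunks ((num_list.flatMap (fun i => pvEnc i.toNat)).map pvBitChar)).map
          (fun c => Char.ofNat (pvParseBin2 c))) := by
  unfold num2ascii
  simp only []
  rw [foldl_append_flat
        (fun i => PySem.Chars.zfill (PySem.List.slice (PySem.Int.toBinChars0b i) (some 2) none) 5)
        num_list [],
      List.nil_append, flat_eq num_list hpre]
  rw [PySem.List.len_eq]
  rw [slice_chunks ((num_list.flatMap (fun i => pvEnc i.toNat)).map pvBitChar)]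
  rw [foldl_append_singleton, List.nil_append]

-- ===== VERDICT (by name: the statement is the Claim_ definition above) =====
theorem num2ascii_spec : Claim_equal_num2ascii := by
  intro num_list _hdom hpre
  unfold Spec_num2ascii
  rw [a_eq num_list hpre, altB_eq num_list]
  set flat := num_list.flatMap (fun i => pvEnc i.toNat) with hflat
  rw [show (([], 0, 0) : List Char × Nat × Nat)
      = (([] : List Char), pvVal [], ([] : List Nat).length) from rfl]
  rw [stream_eq flat [] [] (by simp)]
  rw [List.nil_append, List.nil_append, chunks_map, List.map_map]
  congr 1
  apply List.map_congr_left
  intro c hc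
  simp only [Function.comp]
  congr 1
  refine parse_map_bitChar c (fun b hb => ?_)
  rcases List.mem_flatMap.mp (chunks_mem flat c hc b hb) with ⟨i, _, hbi⟩
  exact enc_bits i.toNat b hbi
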